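-- pv_equiv track=rewrite | github.com/Rye-lxy/Caspeak | bin/plotter.py | getRangePixBegs
-- ===== SOURCE A (Python) =====
-- def getRangePixBegs(rangePixLens, pixTweenRanges, margin):
--     '''Get the start pixel for each range.'''
--     rangePixBegs = []
--     pix_tot = margin - pixTweenRanges
--     for i in rangePixLens:
--         pix_tot += pixTweenRanges
--         rangePixBegs.append(pix_tot)
--         pix_tot += i
--     return rangePixBegs
-- ===== SOURCE B (Python) =====
-- def getRangePixBegs(rangePixLens, pixTweenRanges, margin):
--     '''Get the start pixel for each range.'''
--     prefix = [0]
--     for L in rangePixLens: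
--         prefix.append(prefix[-1] + L)
--     return [margin + i * pixTweenRanges + p for i, p in enumerate(prefix[:-1])]
-- ===== Notes on version B (the rewrite author's own statement) =====
-- stated objective: alternative
-- what changed: Replaces A's single interleaved running accumulator with a two-phase decomposition: first build a cumulative prefix-sum table of the lengths, then combine each index in one pass with the closed form margin + i*pixTweenRanges + prefix[i].
import Mathlib
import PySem

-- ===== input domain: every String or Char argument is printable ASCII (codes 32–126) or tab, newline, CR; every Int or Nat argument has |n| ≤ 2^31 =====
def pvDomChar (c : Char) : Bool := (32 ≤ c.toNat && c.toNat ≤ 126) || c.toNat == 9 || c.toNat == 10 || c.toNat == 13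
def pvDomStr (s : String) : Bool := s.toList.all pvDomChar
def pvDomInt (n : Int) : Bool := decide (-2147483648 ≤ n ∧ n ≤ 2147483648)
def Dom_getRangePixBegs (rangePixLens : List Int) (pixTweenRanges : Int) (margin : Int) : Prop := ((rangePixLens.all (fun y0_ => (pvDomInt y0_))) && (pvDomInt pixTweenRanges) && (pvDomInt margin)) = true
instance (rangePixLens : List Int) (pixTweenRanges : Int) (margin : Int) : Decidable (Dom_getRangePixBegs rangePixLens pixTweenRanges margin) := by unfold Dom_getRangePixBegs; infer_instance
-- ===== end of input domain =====

-- B replaces A's single interleaved running accumulator with a prefix-sum table plus a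
-- closed-form per-index combining pass (alternative decomposition, same cost).
-- ===== PORT A =====
def getRangePixBegs (rangePixLens : List Int) (pixTweenRanges : Int) (margin : Int) : List Int :=
  (rangePixLens.foldl
    (fun (s : List Int × Int) i =>
      let t := s.2 + pixTweenRanges
      (s.1 ++ [t], t + i))
    (([] : List Int), margin - pixTweenRanges)).1

-- ===== PORT B =====
-- prefix = [0]; for L in rangePixLens: prefix.append(prefix[-1] + L)
def pvPrefixB (rangePixLens : List Int) : List Int :=
  rangePixLens.foldl
    (fun pre L => pre ++ [(PySem.List.pyGet? pre (-1)).getD 0 + L]) [0]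

def getRangePixBegs_alt (rangePixLens : List Int) (pixTweenRanges : Int) (margin : Int) : List Int :=
  (PySem.List.enumerate (PySem.List.slice (pvPrefixB rangePixLens) none (some (-1))) 0).map
    (fun ip => margin + ip.1 * pixTweenRanges + ip.2)

-- ===== PRECONDITION & SPEC =====
def Spec_getRangePixBegs (rangePixLens : List Int) (pixTweenRanges : Int) (margin : Int) (out : List Int) : Prop := out = getRangePixBegs_alt rangePixLens pixTweenRanges margin
instance (rangePixLens : List Int) (pixTweenRanges : Int) (margin : Int) (out : List Int) : Decidable (Spec_getRangePixBegs rangePixLens pixTweenRanges margin out) := by unfold Spec_getRangePixBegs; infer_instance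

-- ===== CLAIM (what is proved, stated in full; the proofs are below) =====
def Claim_equal_getRangePixBegs : Prop := ∀ (rangePixLens : List Int) (pixTweenRanges : Int) (margin : Int), Dom_getRangePixBegs rangePixLens pixTweenRanges margin → Spec_getRangePixBegs rangePixLens pixTweenRanges margin (getRangePixBegs rangePixLens pixTweenRanges margin)

-- ===== LEMMAS AND PROOFS =====
-- helper spec: A's output as structural recursion
def pvSpec (lens : List Int) (ptr : Int) (m : Int) : List Int :=
  match lens with
  | [] => []
  | i :: rest => m :: pvSpec rest ptr (m + i + ptr)

-- inclusive cumulative sums starting from t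
def pvCum (lens : List Int) (t : Int) : List Int :=
  match lens with
  | [] => []
  | L :: rest => (t + L) :: pvCum rest (t + L)

theorem pyGet_neg_one (xs : List Int) (t : Int) :
    PySem.List.pyGet? (xs ++ [t]) (-1) = some t := by
  simp [PySem.List.pyGet?, PySem.List.pyIdx?]

theorem A_eq (lens : List Int) (ptr : Int) : ∀ (acc : List Int) (tot : Int),
    (lens.foldl
      (fun (s : List Int × Int) i =>
        let t := s.2 + ptr
        (s.1 ++ [t], t + i)) (acc, tot)).1 = acc ++ pvSpec lens ptr (tot + ptr) := by
  induction lens with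
  | nil => intro acc tot; simp [pvSpec]
  | cons i rest ih =>
      intro acc tot
      simp only [List.foldl_cons, pvSpec]
      rw [ih (acc ++ [tot + ptr]) (tot + ptr + i)]
      simp [List.append_assoc]

theorem prefix_eq (lens : List Int) : ∀ (acc : List Int) (t : Int),
    lens.foldl (fun pre L => pre ++ [(PySem.List.pyGet? pre (-1)).getD 0 + L]) (acc ++ [t])
      = (acc ++ [t]) ++ pvCum lens t := by
  induction lens with
  | nil => intro acc t; simp [pvCum]
  | cons L rest ih =>
      intro acc t
      simp only [List.foldl_cons, pvCum, pyGet_neg_one, Option.getD_some]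
      have := ih (acc ++ [t]) (t + L)
      simpa [List.append_assoc] using this

theorem B_eq (ptr : Int) (lens : List Int) : ∀ (t s m : Int),
    (PySem.List.enumerate ((t :: pvCum lens t).dropLast) s).map
        (fun ip => m + ip.1 * ptr + ip.2)
      = pvSpec lens ptr (m + s * ptr + t) := by
  induction lens with
  | nil => intro t s m; simp [pvCum, pvSpec, PySem.List.enumerate_nil]
  | cons L rest ih =>
      intro t s m
      simp only [pvCum, pvSpec, List.dropLast_cons₂, PySem.List.enumerate_cons, List.map_cons]
      rw [ih (t + L) (s + 1) m]
      congr 2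
      ring

-- ===== VERDICT (by name: the statement is the Claim_ definition above) =====
theorem getRangePixBegs_spec : Claim_equal_getRangePixBegs := by
  intro lens ptr m _
  unfold Spec_getRangePixBegs getRangePixBegs getRangePixBegs_alt pvPrefixB
  rw [A_eq lens ptr [] (m - ptr)]
  have hp := prefix_eq lens [] 0
  simp only [List.nil_append] at hp ⊢
  rw [hp, PySem.List.slice_to_neg_one]
  simp only [List.singleton_append]
  rw [B_eq ptr lens 0 0 m]
  congr 1
  ring
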